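-- pv_equiv track=rewrite | github.com/liujuanjuan1984/a2a-client-hub | backend/app/integrations/a2a_extensions/shared_support.py | normalize_error_data_type
-- ===== SOURCE A (Python) =====
-- from typing import Any, Dict, Mapping, Optional, cast
--
-- def normalize_error_data_type(error: Dict[str, Any]) -> Optional[str]:
--     data = error.get("data")
--     if not isinstance(data, dict):
--         return None
--     raw_type = data.get("type")
--     if not isinstance(raw_type, str):
--         return None
--     normalized: list[str] = []
--     pending_sep = False
--     for ch in raw_type.strip().lower():
--         if ch.isalnum():
--             if pending_sep and normalized:
--                 normalized.append("_")
--             normalized.append(ch)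
--             pending_sep = False
--             continue
--         pending_sep = True
--     token = "".join(normalized).strip("_")
--     return token or None
-- ===== SOURCE B (Python) =====
-- from typing import Any, Dict, Optional
--
--
-- def normalize_error_data_type(error: Dict[str, Any]) -> Optional[str]:
--     data = error.get("data")
--     if not isinstance(data, dict):
--         return None
--     raw_type = data.get("type")
--     if not isinstance(raw_type, str):
--         return None
--     s = raw_type.strip().lower()
--     tokens = []
--     i, n = 0, len(s)
--     while i < n:
--         if s[i].isalnum():
--             j = i
--             while j < n and s[j].isalnum():
--                 j += 1
--             tokens.append(s[i:j])
--             i = j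
--         else:
--             i += 1
--     return "_".join(tokens) or None
-- ===== Notes on version B (the rewrite author's own statement) =====
-- stated objective: alternative
-- what changed: Replaces A's character-by-character accumulator with a pending-separator flag by a two-index run scanner that slices out each maximal alphanumeric run as a whole token and joins the token list with underscores (no trailing strip('_') needed).
import Mathlib
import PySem

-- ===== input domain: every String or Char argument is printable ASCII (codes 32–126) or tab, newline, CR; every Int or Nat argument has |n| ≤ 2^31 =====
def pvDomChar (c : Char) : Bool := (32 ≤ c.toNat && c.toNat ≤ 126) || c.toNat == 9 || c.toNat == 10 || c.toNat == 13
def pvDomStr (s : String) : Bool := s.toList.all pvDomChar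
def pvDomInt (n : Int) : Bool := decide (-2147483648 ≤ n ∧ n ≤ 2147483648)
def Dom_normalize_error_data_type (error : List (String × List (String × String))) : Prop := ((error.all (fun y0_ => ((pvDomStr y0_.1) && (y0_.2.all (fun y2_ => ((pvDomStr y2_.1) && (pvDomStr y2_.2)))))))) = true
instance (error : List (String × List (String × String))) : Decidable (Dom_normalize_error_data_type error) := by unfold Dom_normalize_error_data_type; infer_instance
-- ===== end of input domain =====

-- B replaces A's char-by-char accumulation with a pending-separator flag by a
-- run scanner that slices each maximal alphanumeric run out as one token and
-- joins the tokens with underscores: alternative decomposition, same cost.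
-- Under the type convention dict[str, dict[str, str]], the two isinstance
-- guards of A are satisfied whenever the respective key is present, so both
-- ports reduce them to the dict lookups.

-- ===== PORT A =====
def normalize_error_data_type (error : List (String × List (String × String))) : Option String :=
  match (PySem.Dict.mk error).get? "data" with
  | none => none            -- data is None (or absent): `not isinstance(data, dict)`
  | some data =>
    match (PySem.Dict.mk data).get? "type" with
    | none => none          -- raw_type is None: `not isinstance(raw_type, str)`
    | some raw_type =>
      let st := (PySem.Chars.lower (PySem.Chars.strip raw_type.toList)).foldl
        (fun (st : List Char × Bool) ch =>
          if PySem.Chars.isalnum ch then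
            ((st.1 ++ (if st.2 && !st.1.isEmpty then ['_'] else [])) ++ [ch], false)
          else (st.1, true)) ([], false)
      let token := PySem.Chars.stripChars st.1 ['_']
      if token.isEmpty then none else some (String.ofList token)

-- ===== PORT B =====
-- the two-index while loops of Source B: the inner loop advances j over the maximal
-- alphanumeric run starting at i (takeWhile/dropWhile of that run), the outer
-- loop skips one non-alphanumeric character; each run is appended as one token
def pvAltRuns : List Char → List (List Char)
  | [] => []
  | c :: cs =>
    if PySem.Chars.isalnum c then
      (c :: cs.takeWhile PySem.Chars.isalnum) :: pvAltRuns (cs.dropWhile PySem.Chars.isalnum)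
    else pvAltRuns cs
termination_by cs => cs.length
decreasing_by
  · have := List.length_dropWhile_le PySem.Chars.isalnum cs; simp; omega
  · simp

def normalize_error_data_type_alt (error : List (String × List (String × String))) : Option String :=
  ((PySem.Dict.mk error).get? "data").bind fun data =>
    ((PySem.Dict.mk data).get? "type").bind fun raw_type =>
      let tokens := pvAltRuns (PySem.Chars.lower (PySem.Chars.strip raw_type.toList))
      let joined := List.intercalate ['_'] tokens
      if joined = [] then none else some (String.ofList joined)

-- ===== PRECONDITION & SPEC =====
def Spec_normalize_error_data_type (error : List (String × List (String × String))) (out : Option String) : Prop := out = normalize_error_data_type_alt error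
instance (error : List (String × List (String × String))) (out : Option String) : Decidable (Spec_normalize_error_data_type error out) := by unfold Spec_normalize_error_data_type; infer_instance

-- ===== CLAIM (what is proved, stated in full; the proofs are below) =====
def Claim_equal_normalize_error_data_type : Prop := ∀ (error : List (String × List (String × String))), Dom_normalize_error_data_type error → Spec_normalize_error_data_type error (normalize_error_data_type error)

-- ===== LEMMAS AND PROOFS =====

-- A's accumulator continuation: characters still to be emitted given the pending flag
def pvKF : Bool → List Char → List Char
  | _, [] => []
  | b, c :: cs => if PySem.Chars.isalnum c then (if b then ['_'] else []) ++ c :: pvKF false cs else pvKF true cs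
-- A's full loop result from the empty accumulator
def pvNorm : List Char → List Char
  | [] => []
  | c :: cs => if PySem.Chars.isalnum c then c :: pvKF false cs else pvNorm cs

theorem pv_alnum_ne_underscore (c : Char) (h : PySem.Chars.isalnum c = true) : c ≠ '_' := by
  intro he; subst he
  simp [PySem.Chars.isalnum, PySem.Chars.isalpha, PySem.Chars.isupper, PySem.Chars.islower,
    PySem.Chars.isdigit] at h

theorem pv_intercalate_cons (sep t : List Char) (ts : List (List Char)) :
    List.intercalate sep (t :: ts) = t ++ (if ts = [] then [] else sep ++ List.intercalate sep ts) := by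
  cases ts with
  | nil => simp [List.intercalate]
  | cons u us =>
    simp only [reduceCtorEq, if_false]
    simp [List.intercalate, List.flatten_cons, List.append_assoc]

theorem pv_KF_false_eq (cs : List Char) :
    pvKF false cs = cs.takeWhile PySem.Chars.isalnum ++ pvKF true (cs.dropWhile PySem.Chars.isalnum) := by
  induction cs with
  | nil => simp [pvKF]
  | cons c cs ih =>
    by_cases h : PySem.Chars.isalnum c = true
    · simp [pvKF, h, List.takeWhile_cons, List.dropWhile_cons, ih]
    · have h' : PySem.Chars.isalnum c = false := by simpa using h
      simp [pvKF, h', List.takeWhile_cons, List.dropWhile_cons]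

theorem pv_KF_true_eq : ∀ (n : Nat) (cs : List Char), cs.length ≤ n →
    pvKF true cs = (if pvAltRuns cs = [] then []
      else '_' :: List.intercalate ['_'] (pvAltRuns cs)) := by
  intro n
  induction n with
  | zero =>
    intro cs h
    have : cs = [] := List.length_eq_zero_iff.mp (Nat.le_zero.mp h)
    subst this; simp [pvKF, pvAltRuns]
  | succ n ih =>
    intro cs h
    cases cs with
    | nil => simp [pvKF, pvAltRuns]
    | cons c cs =>
      by_cases hc : PySem.Chars.isalnum c = true
      · rw [show pvKF true (c :: cs) = '_' :: c :: pvKF false cs by simp [pvKF, hc]]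
        rw [pv_KF_false_eq]
        have hlen : (cs.dropWhile PySem.Chars.isalnum).length ≤ n := by
          have := List.length_dropWhile_le PySem.Chars.isalnum cs
          simp at h; omega
        rw [ih _ hlen]
        rw [show pvAltRuns (c :: cs)
            = (c :: cs.takeWhile PySem.Chars.isalnum) :: pvAltRuns (cs.dropWhile PySem.Chars.isalnum) by
          simp [pvAltRuns, hc]]
        simp only [reduceCtorEq, if_false]
        rw [pv_intercalate_cons]
        by_cases hr : pvAltRuns (cs.dropWhile PySem.Chars.isalnum) = []
        · simp [hr]
        · simp [hr]
      · have hc' : PySem.Chars.isalnum c = false := by simpa using hc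
        rw [show pvKF true (c :: cs) = pvKF true cs by simp [pvKF, hc']]
        have hlen : cs.length ≤ n := by simp at h; omega
        rw [ih _ hlen, show pvAltRuns (c :: cs) = pvAltRuns cs by simp [pvAltRuns, hc']]

theorem pv_norm_eq (cs : List Char) :
    pvNorm cs = List.intercalate ['_'] (pvAltRuns cs) := by
  induction cs with
  | nil => simp [pvNorm, pvAltRuns, List.intercalate]
  | cons c cs ih =>
    by_cases hc : PySem.Chars.isalnum c = true
    · rw [show pvNorm (c :: cs) = c :: pvKF false cs by simp [pvNorm, hc]]
      rw [pv_KF_false_eq, pv_KF_true_eq (cs.dropWhile PySem.Chars.isalnum).length _ le_rfl]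
      rw [show pvAltRuns (c :: cs)
          = (c :: cs.takeWhile PySem.Chars.isalnum) :: pvAltRuns (cs.dropWhile PySem.Chars.isalnum) by
        simp [pvAltRuns, hc]]
      rw [pv_intercalate_cons]
      by_cases hr : pvAltRuns (cs.dropWhile PySem.Chars.isalnum) = []
      · simp [hr]
      · simp [hr]
    · have hc' : PySem.Chars.isalnum c = false := by simpa using hc
      rw [show pvNorm (c :: cs) = pvNorm cs by simp [pvNorm, hc']]
      rw [ih, show pvAltRuns (c :: cs) = pvAltRuns cs by simp [pvAltRuns, hc']]

-- A's loop body, named for the proofs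
def pvStep (st : List Char × Bool) (ch : Char) : List Char × Bool :=
  if PySem.Chars.isalnum ch then
    ((st.1 ++ (if st.2 && !st.1.isEmpty then ['_'] else [])) ++ [ch], false)
  else (st.1, true)

theorem pv_fold_nonempty (cs : List Char) : ∀ (acc : List Char) (b : Bool), acc ≠ [] →
    (cs.foldl pvStep (acc, b)).1 = acc ++ pvKF b cs := by
  induction cs with
  | nil => intro acc b _; simp [pvKF]
  | cons c cs ih =>
    intro acc b hacc
    by_cases hc : PySem.Chars.isalnum c = true
    · have hne : (acc ++ (if b && !acc.isEmpty then ['_'] else [])) ++ [c] ≠ [] := by simp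
      have hE : acc.isEmpty = false := by simpa [List.isEmpty_iff] using hacc
      rw [List.foldl_cons, show pvStep (acc, b) c = ((acc ++ (if b && !acc.isEmpty then ['_'] else [])) ++ [c], false) by simp [pvStep, hc]]
      rw [ih _ _ hne]
      simp [pvKF, hc, hE, List.append_assoc]
    · have hc' : PySem.Chars.isalnum c = false := by simpa using hc
      rw [List.foldl_cons, show pvStep (acc, b) c = (acc, true) by simp [pvStep, hc']]
      rw [ih _ _ hacc]
      simp [pvKF, hc']

theorem pv_fold_top (cs : List Char) : ∀ (b : Bool), (cs.foldl pvStep ([], b)).1 = pvNorm cs := by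
  induction cs with
  | nil => intro b; simp [pvNorm]
  | cons c cs ih =>
    intro b
    by_cases hc : PySem.Chars.isalnum c = true
    · rw [List.foldl_cons, show pvStep ([], b) c = ([c], false) by simp [pvStep, hc]]
      rw [pv_fold_nonempty cs [c] false (by simp)]
      simp [pvNorm, hc]
    · have hc' : PySem.Chars.isalnum c = false := by simpa using hc
      rw [List.foldl_cons, show pvStep ([], b) c = ([], true) by simp [pvStep, hc']]
      rw [ih]
      simp [pvNorm, hc']

theorem pv_KF_getLast (cs : List Char) : ∀ (b : Bool) (d : Char),
    (pvKF b cs).getLast? = some d → PySem.Chars.isalnum d = true := by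
  induction cs with
  | nil => intro b d h; simp [pvKF] at h
  | cons c cs ih =>
    intro b d h
    by_cases hc : PySem.Chars.isalnum c = true
    · rw [show pvKF b (c :: cs) = (if b then ['_'] else []) ++ c :: pvKF false cs by simp [pvKF, hc]] at h
      rw [List.getLast?_append, show (c :: pvKF false cs) = [c] ++ pvKF false cs from rfl,
        List.getLast?_append] at h
      cases hr : (pvKF false cs).getLast? with
      | some e =>
        rw [hr] at h; simp at h
        exact h ▸ ih false e hr
      | none =>
        rw [hr] at h; simp at h; subst h; exact hc
    · have hc' : PySem.Chars.isalnum c = false := by simpa using hc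
      rw [show pvKF b (c :: cs) = pvKF true cs by simp [pvKF, hc']] at h
      exact ih true d h

theorem pv_norm_head (cs : List Char) : ∀ (d : Char),
    (pvNorm cs).head? = some d → PySem.Chars.isalnum d = true := by
  induction cs with
  | nil => intro d h; simp [pvNorm] at h
  | cons c cs ih =>
    intro d h
    by_cases hc : PySem.Chars.isalnum c = true
    · rw [show pvNorm (c :: cs) = c :: pvKF false cs by simp [pvNorm, hc]] at h
      simp at h; subst h; exact hc
    · have hc' : PySem.Chars.isalnum c = false := by simpa using hc
      rw [show pvNorm (c :: cs) = pvNorm cs by simp [pvNorm, hc']] at h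
      exact ih d h

theorem pv_norm_getLast (cs : List Char) : ∀ (d : Char),
    (pvNorm cs).getLast? = some d → PySem.Chars.isalnum d = true := by
  induction cs with
  | nil => intro d h; simp [pvNorm] at h
  | cons c cs ih =>
    intro d h
    by_cases hc : PySem.Chars.isalnum c = true
    · rw [show pvNorm (c :: cs) = c :: pvKF false cs by simp [pvNorm, hc]] at h
      rw [show (c :: pvKF false cs) = [c] ++ pvKF false cs from rfl, List.getLast?_append] at h
      cases hr : (pvKF false cs).getLast? with
      | some e =>
        rw [hr] at h; simp at h
        exact h ▸ pv_KF_getLast cs false e hr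
      | none =>
        rw [hr] at h; simp at h; subst h; exact hc
    · have hc' : PySem.Chars.isalnum c = false := by simpa using hc
      rw [show pvNorm (c :: cs) = pvNorm cs by simp [pvNorm, hc']] at h
      exact ih d h

theorem pv_stripChars_id (s : List Char)
    (h1 : ∀ d, s.head? = some d → d ≠ '_') (h2 : ∀ d, s.getLast? = some d → d ≠ '_') :
    PySem.Chars.stripChars s ['_'] = s := by
  have hdrop : ∀ (t : List Char), (∀ d, t.head? = some d → d ≠ '_') →
      t.dropWhile (fun c => List.contains ['_'] c) = t := by
    intro t ht
    cases t with
    | nil => simp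
    | cons x xs =>
      have : x ≠ '_' := ht x (by simp)
      simp [List.dropWhile_cons, this]
  simp only [PySem.Chars.stripChars]
  rw [hdrop s h1]
  rw [hdrop s.reverse (by intro d hd; exact h2 d (by rwa [List.head?_reverse] at hd))]
  exact List.reverse_reverse s

theorem pv_tokens (s : List Char) :
    PySem.Chars.stripChars ((s.foldl (fun (st : List Char × Bool) ch =>
        if PySem.Chars.isalnum ch then
          ((st.1 ++ (if st.2 && !st.1.isEmpty then ['_'] else [])) ++ [ch], false)
        else (st.1, true)) ([], false)).1) ['_']
      = List.intercalate ['_'] (pvAltRuns s) := by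
  show PySem.Chars.stripChars ((s.foldl pvStep ([], false)).1) ['_']
      = List.intercalate ['_'] (pvAltRuns s)
  rw [pv_fold_top s false, ← pv_norm_eq]
  exact pv_stripChars_id (pvNorm s)
    (fun d hd => pv_alnum_ne_underscore d (pv_norm_head s d hd))
    (fun d hd => pv_alnum_ne_underscore d (pv_norm_getLast s d hd))

-- ===== VERDICT (by name: the statement is the Claim_ definition above) =====
theorem normalize_error_data_type_spec : Claim_equal_normalize_error_data_type := by
  intro error _
  unfold Spec_normalize_error_data_type
  cases h1 : (PySem.Dict.mk error).get? "data" with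
  | none => simp [normalize_error_data_type, normalize_error_data_type_alt, h1]
  | some data =>
    cases h2 : (PySem.Dict.mk data).get? "type" with
    | none => simp [normalize_error_data_type, normalize_error_data_type_alt, h1, h2]
    | some raw_type =>
      simp only [normalize_error_data_type, normalize_error_data_type_alt, h1, h2, Option.bind_some]
      rw [pv_tokens]
      simp [List.isEmpty_iff]
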